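-- pv_equiv track=rewrite | github.com/ManonMars12/L3-INFO | atelier_4_partie_1.py | incluse
-- ===== SOURCE A (Python) =====
-- def incluse(l1:list, l2:list)->bool:
--
--     """
--     Vérifie si tous les éléments de la liste `l1` sont inclus dans la liste `l2` dans le même ordre à l'aide de la récursivité.
--
--     Args:
--         l1 (list): Une liste d'éléments à vérifier.
--         l2 (list): Une liste dans laquelle chercher les éléments de `l1`.
--
--     Returns:
--         bool: True si tous les éléments de `l1` sont présents dans `l2` dans le même ordre, False sinon.
--     """
--
--     if l1==[]:
--         return(True)
--     if l2==[] and l1 != []: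
--         return(False)
--
--     if l1[0] in l2 :
--         for i in range(len(l2)):
--             if l2[i]==l1[0]:
--                 place=i
--         return(incluse(l1[1:], l2[place:]))
--     else :
--         return(False)
-- ===== SOURCE B (Python) =====
-- def incluse(l1: list, l2: list) -> bool:
--     last = {}
--     for i, v in enumerate(l2):
--         last[v] = i
--     p = 0
--     for x in l1:
--         j = last.get(x)
--         if j is None or j < p:
--             return False
--         p = j
--     return True
-- ===== Notes on version B (the rewrite author's own statement) =====
-- stated objective: faster
-- what changed: replaces A's recursion that rescans the whole remaining suffix of l2 for each element of l1 with a one-pass dict of last indices in l2 plus a monotone pointer scanned along l1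
import Mathlib
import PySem

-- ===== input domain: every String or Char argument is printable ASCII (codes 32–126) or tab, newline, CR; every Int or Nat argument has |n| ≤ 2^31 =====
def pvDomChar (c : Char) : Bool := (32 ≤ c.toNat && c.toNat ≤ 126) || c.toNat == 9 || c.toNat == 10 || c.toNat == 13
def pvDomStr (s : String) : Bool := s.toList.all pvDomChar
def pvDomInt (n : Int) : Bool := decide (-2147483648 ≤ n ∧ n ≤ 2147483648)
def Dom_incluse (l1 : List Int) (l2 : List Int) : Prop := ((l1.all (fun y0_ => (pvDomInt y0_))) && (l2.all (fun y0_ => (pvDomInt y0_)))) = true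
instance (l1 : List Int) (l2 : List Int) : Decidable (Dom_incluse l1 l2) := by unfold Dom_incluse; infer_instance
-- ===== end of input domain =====

-- B replaces A's per-element rescans of the remaining suffix of l2 by a dict of last
-- indices built once over l2 plus a monotone pointer scanned along l1 (objective: faster).

-- ===== PORT A =====
def incluse (l1 : List Int) (l2 : List Int) : Bool :=
  match l1 with
  | [] => true
  | x :: rest =>
    if l2 = [] then false        -- 'l2==[] and l1 != []': here l1 ≠ [] always holds
    else if l2.contains x then
      -- Python's 'place' is always assigned by the loop here (x ∈ l2); init 0 stands for the not-yet-assigned variable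
      let place := (PySem.List.pyRange 0 (l2.length : Int) 1).foldl
        (fun acc i => if PySem.List.pyGetD l2 i 0 = x then i else acc) 0
      incluse rest (PySem.List.slice l2 (some place) none)
    else false

-- ===== PORT B =====
-- the early-return loop over l1 with pointer p
def incluseAltGo (last : PySem.Dict Int Int) : List Int → Int → Bool
  | [], _ => true
  | x :: xs, p =>
    match last.get? x with
    | none => false
    | some j => if j < p then false else incluseAltGo last xs j

def incluse_alt (l1 : List Int) (l2 : List Int) : Bool :=
  let last := (PySem.List.enumerate l2).foldl (fun d p => d.insert p.2 p.1) PySem.Dict.empty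
  incluseAltGo last l1 0

-- ===== PRECONDITION & SPEC =====
def Spec_incluse (l1 : List Int) (l2 : List Int) (out : Bool) : Prop := out = incluse_alt l1 l2
instance (l1 : List Int) (l2 : List Int) (out : Bool) : Decidable (Spec_incluse l1 l2 out) := by unfold Spec_incluse; infer_instance

-- ===== CLAIM (what is proved, stated in full; the proofs are below) =====
def Claim_equal_incluse : Prop := ∀ (l1 : List Int) (l2 : List Int), Dom_incluse l1 l2 → Spec_incluse l1 l2 (incluse l1 l2)

-- ===== LEMMAS AND PROOFS =====

-- index of the LAST occurrence of x in l (none if absent); proof-side reference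
def lastNat? : List Int → Int → Option Nat
  | [], _ => none
  | y :: ys, x =>
    match lastNat? ys x with
    | some k => some (k + 1)
    | none => if y = x then some 0 else none

theorem lastNat?_eq_none_iff (l : List Int) (x : Int) : lastNat? l x = none ↔ x ∉ l := by
  induction l with
  | nil => simp [lastNat?]
  | cons y ys ih =>
    rcases h : lastNat? ys x with _ | k
    · have hys : x ∉ ys := ih.mp h
      by_cases hyx : y = x
      · simp [lastNat?, h, hyx, hys]
      · simp [lastNat?, h, hyx, hys, Ne.symm hyx]
    · have hys : x ∈ ys := by
        by_contra hc
        rw [ih.mpr hc] at h; cases h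
      simp [lastNat?, h, hys]

theorem lastNat?_append_singleton (ys : List Int) (y x : Int) :
    lastNat? (ys ++ [y]) x = if y = x then some ys.length else lastNat? ys x := by
  induction ys with
  | nil => by_cases h : y = x <;> simp [lastNat?, h]
  | cons z zs ih =>
    simp only [List.cons_append, lastNat?, ih]
    by_cases h : y = x
    · simp [h, List.length_cons]
    · simp [h]

theorem lastNat?_drop (l : List Int) (p : Nat) (x : Int) :
    lastNat? (l.drop p) x
      = (lastNat? l x).bind (fun k => if p ≤ k then some (k - p) else none) := by
  induction l generalizing p with
  | nil => simp [lastNat?]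
  | cons y ys ih =>
    cases p with
    | zero =>
      simp only [List.drop_zero]
      rcases h : lastNat? (y :: ys) x with _ | k <;> simp
    | succ q =>
      simp only [List.drop_succ_cons, ih]
      rcases h : lastNat? ys x with _ | k
      · simp only [lastNat?, h]
        by_cases hyx : y = x <;> simp [hyx]
      · simp only [lastNat?, h, Option.bind_some]
        by_cases hq : q ≤ k
        · rw [if_pos hq, if_pos (by omega), Nat.succ_sub_succ]
        · rw [if_neg hq, if_neg (by omega)]

-- A's place-computing loop over range(len(l)) computes exactly the last index
theorem foldlA_eq (l : List Int) (x init : Int) :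
    (PySem.List.pyRange 0 (l.length : Int) 1).foldl
        (fun acc i => if PySem.List.pyGetD l i 0 = x then i else acc) init
      = match lastNat? l x with | some k => (k : Int) | none => init := by
  rw [PySem.List.pyRange_zero_natCast, List.foldl_map]
  induction l using List.reverseRecOn generalizing init with
  | nil => simp [lastNat?]
  | append_singleton ys y ih =>
    rw [List.length_append, List.length_cons, List.length_nil, Nat.add_zero,
        List.range_succ, List.foldl_append]
    have hcongr : (List.range ys.length).foldl
        (fun acc (i : Nat) => if PySem.List.pyGetD (ys ++ [y]) (i : Int) 0 = x then (i : Int) else acc) init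
        = (List.range ys.length).foldl
        (fun acc (i : Nat) => if PySem.List.pyGetD ys (i : Int) 0 = x then (i : Int) else acc) init := by
      apply PySem.List.foldl_congr_mem
      intro acc i hi
      rw [List.mem_range] at hi
      rw [PySem.List.pyGetD_natCast, PySem.List.pyGetD_natCast,
          List.getD_eq_getElem?_getD, List.getD_eq_getElem?_getD,
          List.getElem?_append_left hi]
    rw [hcongr, ih]
    rw [List.foldl_cons, List.foldl_nil, PySem.List.pyGetD_natCast,
        List.getD_eq_getElem?_getD, List.getElem?_append_right (le_refl ys.length)]
    simp only [Nat.sub_self, List.getElem?_cons_zero, Option.getD_some]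
    rw [lastNat?_append_singleton]
    by_cases hyx : y = x
    · simp [hyx]
    · rcases h : lastNat? ys x with _ | k <;> simp [hyx]

-- last value stored for key x by a (value, key)-pair list, front to back
def lastVal? : List (Int × Int) → Int → Option Int
  | [], _ => none
  | p :: ps, x =>
    match lastVal? ps x with
    | some v => some v
    | none => if p.2 = x then some p.1 else none

theorem get?_foldl_insert (ps : List (Int × Int)) (d : PySem.Dict Int Int) (x : Int) :
    (ps.foldl (fun d p => d.insert p.2 p.1) d).get? x
      = match lastVal? ps x with | some v => some v | none => d.get? x := by
  induction ps generalizing d with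
  | nil => simp [lastVal?]
  | cons p ps ih =>
    rw [List.foldl_cons, ih]
    simp only [lastVal?]
    rcases h : lastVal? ps x with _ | v
    · rw [PySem.Dict.get?_insert]
      by_cases hk : p.2 = x
      · simp [hk]
      · simp [hk, Ne.symm hk]
    · simp

theorem lastVal?_enumerate (l : List Int) (s : Int) (x : Int) :
    lastVal? (PySem.List.enumerate l s) x = (lastNat? l x).map (fun k : Nat => s + (k : Int)) := by
  induction l generalizing s with
  | nil => simp [PySem.List.enumerate_nil, lastVal?, lastNat?]
  | cons y ys ih =>
    rw [PySem.List.enumerate_cons]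
    simp only [lastVal?, ih, lastNat?]
    rcases h : lastNat? ys x with _ | k
    · by_cases hyx : y = x <;> simp [hyx]
    · simp only [Option.map_some]
      congr 1
      push_cast
      ring

-- B's dict holds exactly the last index of each value of l2
theorem get?_mkLast (l : List Int) (x : Int) :
    ((PySem.List.enumerate l).foldl (fun d p => d.insert p.2 p.1) PySem.Dict.empty).get? x
      = (lastNat? l x).map (fun k : Nat => (k : Int)) := by
  rw [get?_foldl_insert, lastVal?_enumerate]
  rcases h : lastNat? l x with _ | k
  · simp [PySem.Dict.get?_empty]
  · simp

theorem main_incluse (l1 : List Int) (l2 : List Int) (p : Nat) :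
    incluse l1 (l2.drop p)
      = incluseAltGo ((PySem.List.enumerate l2).foldl (fun d q => d.insert q.2 q.1) PySem.Dict.empty) l1 (p : Int) := by
  induction l1 generalizing p with
  | nil => simp [incluse, incluseAltGo]
  | cons x rest ih =>
    simp only [incluse, incluseAltGo, get?_mkLast]
    rcases h : lastNat? l2 x with _ | k
    · -- x not in l2, hence not in any suffix
      have hnot : x ∉ l2.drop p :=
        fun hmem => (lastNat?_eq_none_iff l2 x).mp h (List.drop_subset (l := l2) (i := p) hmem)
      by_cases he : l2.drop p = [] <;> simp [he, hnot]
    · have hd := lastNat?_drop l2 p x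
      rw [h, Option.bind_some] at hd
      simp only [Option.map_some]
      by_cases hpk : p ≤ k
      · rw [if_pos hpk] at hd
        have hmem : x ∈ l2.drop p := by
          by_contra hc
          rw [(lastNat?_eq_none_iff (l2.drop p) x).mpr hc] at hd; cases hd
        have hne : l2.drop p ≠ [] := by
          intro hc; rw [hc] at hmem; exact absurd hmem (List.not_mem_nil)
        rw [if_neg hne, if_pos (by simpa using hmem)]
        rw [foldlA_eq (l2.drop p) x 0, hd]
        simp only []
        rw [PySem.List.slice_from_natCast, List.drop_drop]
        have hk : p + (k - p) = k := by omega
        rw [hk, ih k]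
        rw [if_neg (by exact_mod_cast not_lt.mpr hpk)]
      · rw [if_neg hpk] at hd
        have hnot : x ∉ l2.drop p := (lastNat?_eq_none_iff (l2.drop p) x).mp hd
        have hlt : (k : Int) < (p : Int) := by exact_mod_cast not_le.mp hpk
        conv_rhs => rw [if_pos hlt]
        by_cases he : l2.drop p = [] <;> simp [he, hnot]

-- ===== VERDICT (by name: the statement is the Claim_ definition above) =====
theorem incluse_spec : Claim_equal_incluse := by
  intro l1 l2 _
  unfold Spec_incluse incluse_alt
  simpa using main_incluse l1 l2 0
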